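-- pv_equiv track=rewrite | github.com/dabearrr/practice | prep/ms.py | threeConsec
-- ===== SOURCE A (Python) =====
-- def threeConsec(S):
-- 	prev, count, moves = None, 0, 0
-- 	for char in S:
-- 		if prev != char:
-- 			prev = char
-- 			count = 1
-- 		else:
-- 			count += 1
-- 			if count == 3:
-- 				moves += 1
-- 				count = 0
--
-- 	return moves
-- ===== SOURCE B (Python) =====
-- def threeConsec(S):
--     i, n, moves = 0, len(S), 0
--     while i + 2 < n:
--         if S[i] == S[i + 1] == S[i + 2]:
--             moves += 1
--             i += 3
--         else:
--             i += 1
--     return moves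
-- ===== Notes on version B (the rewrite author's own statement) =====
-- stated objective: alternative
-- what changed: Replaces the per-character count-and-reset-at-3 state machine by a greedy index scan that, on seeing three equal consecutive characters, counts one move and jumps 3 positions ahead (otherwise advances by 1), maintaining no run counter at all.
import Mathlib
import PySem

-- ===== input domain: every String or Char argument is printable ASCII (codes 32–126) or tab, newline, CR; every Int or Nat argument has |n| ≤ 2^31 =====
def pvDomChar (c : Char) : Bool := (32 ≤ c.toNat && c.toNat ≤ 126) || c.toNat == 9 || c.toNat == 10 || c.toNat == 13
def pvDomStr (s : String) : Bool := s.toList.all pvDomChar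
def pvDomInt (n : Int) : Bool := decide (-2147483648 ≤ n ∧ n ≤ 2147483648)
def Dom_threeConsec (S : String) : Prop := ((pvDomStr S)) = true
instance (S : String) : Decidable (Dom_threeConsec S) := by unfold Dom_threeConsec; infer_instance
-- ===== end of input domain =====

-- B replaces A's count-and-reset-at-3 state machine by a greedy scan that jumps 3 positions past each triple of equal consecutive chars (alternative decomposition).


-- ===== PORT A =====
-- one step of A's loop body over state (prev, count, moves)
def tcStep (st : Option Char × Int × Int) (char : Char) : Option Char × Int × Int :=
  if st.1 ≠ some char then (some char, 1, st.2.2)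
  else
    let count := st.2.1 + 1
    if count = 3 then (st.1, 0, st.2.2 + 1) else (st.1, count, st.2.2)

def threeConsec (S : String) : Int :=
  (S.toList.foldl tcStep (none, 0, 0)).2.2

-- ===== PORT B =====
-- greedy scan: while at least 3 chars remain, count a move and skip 3 if the
-- next three are equal, otherwise advance by 1 (Source B's index walk, as list recursion)
def tcGreedy : List Char → Int
  | a :: b :: c :: rest =>
      if a == b && b == c then 1 + tcGreedy rest else tcGreedy (b :: c :: rest)
  | _ => 0
termination_by l => l.length
decreasing_by all_goals (simp only [List.length_cons]; omega)

def threeConsec_alt (S : String) : Int := tcGreedy S.toList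

-- ===== PRECONDITION & SPEC =====
def Spec_threeConsec (S : String) (out : Int) : Prop := out = threeConsec_alt S
instance (S : String) (out : Int) : Decidable (Spec_threeConsec S out) := by unfold Spec_threeConsec; infer_instance

-- ===== CLAIM (what is proved, stated in full; the proofs are below) =====
def Claim_equal_threeConsec : Prop := ∀ (S : String), Dom_threeConsec S → Spec_threeConsec S (threeConsec S)

-- ===== LEMMAS AND PROOFS =====

-- proof-only intermediate: sum of run_length / 3 over maximal equal-char runs
def tcRuns : List Char → Int
  | [] => 0
  | c :: rest =>
      (1 + (rest.takeWhile (· == c)).length : Int) / 3 + tcRuns (rest.dropWhile (· == c))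
termination_by l => l.length
decreasing_by
  simp only [List.length_cons]
  exact Nat.lt_succ_of_le (List.length_dropWhile_le _ _)

-- invariant: from state (some c, k, m) with 0 ≤ k < 3, the fold's moves equal
-- m plus (k + leading run of c)/3 plus tcRuns of the remainder
theorem tcMain (l : List Char) : ∀ (c : Char) (k m : Int), 0 ≤ k → k < 3 →
    (l.foldl tcStep (some c, k, m)).2.2
      = m + (k + ((l.takeWhile (· == c)).length : Int)) / 3 + tcRuns (l.dropWhile (· == c)) := by
  induction l with
  | nil =>
    intro c k m hk0 hk3
    simp [tcRuns, Int.ediv_eq_zero_of_lt hk0 (by omega)]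
  | cons x xs ih =>
    intro c k m hk0 hk3
    by_cases hx : x = c
    · subst hx
      have hstep : tcStep (some x, k, m) x
          = if k + 1 = 3 then (some x, 0, m + 1) else (some x, k + 1, m) := by
        simp [tcStep]
      have htw : List.takeWhile (fun y => y == x) (x :: xs)
          = x :: List.takeWhile (fun y => y == x) xs := by simp
      have hdw : List.dropWhile (fun y => y == x) (x :: xs)
          = List.dropWhile (fun y => y == x) xs := by simp
      rw [List.foldl_cons, hstep]
      by_cases h3 : k + 1 = 3
      · rw [if_pos h3, ih x 0 (m + 1) le_rfl (by omega)]
        have hk2 : k = 2 := by omega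
        subst hk2
        rw [htw, hdw, List.length_cons]
        push_cast
        have h1 : (2 + (((xs.takeWhile (fun y => y == x)).length : Int) + 1))
            = ((xs.takeWhile (fun y => y == x)).length : Int) + 1 * 3 := by ring
        rw [h1, Int.add_mul_ediv_right _ _ (by norm_num : (3:Int) ≠ 0)]
        have h0 : (0 + ((xs.takeWhile (fun y => y == x)).length : Int))
            = ((xs.takeWhile (fun y => y == x)).length : Int) := by ring
        rw [h0]
        ring
      · rw [if_neg h3, ih x (k + 1) m (by omega) (by omega)]
        rw [htw, hdw, List.length_cons]
        push_cast
        have h1 : (k + 1 + ((xs.takeWhile (fun y => y == x)).length : Int))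
            = k + (((xs.takeWhile (fun y => y == x)).length : Int) + 1) := by ring
        rw [h1]
    · have hne : (some c : Option Char) ≠ some x := by simp [Ne, eq_comm, hx]
      have hstep : tcStep (some c, k, m) x = (some x, 1, m) := by
        simp [tcStep, hne]
      have htw : List.takeWhile (fun y => y == c) (x :: xs) = [] := by simp [hx]
      have hdw : List.dropWhile (fun y => y == c) (x :: xs) = x :: xs := by simp [hx]
      rw [List.foldl_cons, hstep, ih x 1 m (by norm_num) (by norm_num), htw, hdw]
      simp only [List.length_nil, Nat.cast_zero, add_zero]
      rw [Int.ediv_eq_zero_of_lt hk0 hk3]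
      simp only [tcRuns]
      ring

-- peeling three equal leading chars removes exactly one move
theorem tcRuns_peel3 (a : Char) (l : List Char) : tcRuns (a :: a :: a :: l) = 1 + tcRuns l := by
  rw [tcRuns]
  have htw : List.takeWhile (· == a) (a :: a :: l) = a :: a :: List.takeWhile (· == a) l := by
    simp
  have hdw : List.dropWhile (· == a) (a :: a :: l) = List.dropWhile (· == a) l := by
    simp
  rw [htw, hdw]
  cases l with
  | nil => simp [tcRuns]
  | cons x xs =>
    by_cases hx : x = a
    · subst hx
      conv_rhs => rw [tcRuns]
      have htw2 : List.takeWhile (· == x) (x :: xs) = x :: List.takeWhile (· == x) xs := by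
        simp
      have hdw2 : List.dropWhile (· == x) (x :: xs) = List.dropWhile (· == x) xs := by
        simp
      rw [htw2, hdw2]
      simp only [List.length_cons]
      push_cast
      set t : Int := ((xs.takeWhile (· == x)).length : Int) with ht
      have h1 : (1 + (t + 1 + 1 + 1)) = (1 + t) + 1 * 3 := by ring
      rw [h1, Int.add_mul_ediv_right _ _ (by norm_num : (3:Int) ≠ 0)]
      ring
    · have htw2 : List.takeWhile (· == a) (x :: xs) = [] := by simp [hx]
      have hdw2 : List.dropWhile (· == a) (x :: xs) = x :: xs := by simp [hx]
      rw [htw2, hdw2]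
      norm_num

-- when the first three chars are not all equal, the head contributes nothing
theorem tcRuns_skip1 (a b c : Char) (l : List Char)
    (h : ¬ (a = b ∧ b = c)) : tcRuns (a :: b :: c :: l) = tcRuns (b :: c :: l) := by
  by_cases hb : b = a
  · subst hb
    have hc : ¬ c = b := fun hc => h ⟨rfl, hc.symm⟩
    rw [tcRuns]
    have htw : List.takeWhile (· == b) (b :: c :: l) = [b] := by simp [hc]
    have hdw : List.dropWhile (· == b) (b :: c :: l) = c :: l := by simp [hc]
    rw [htw, hdw]
    conv_rhs => rw [tcRuns]
    have htw2 : List.takeWhile (· == b) (c :: l) = [] := by simp [hc]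
    have hdw2 : List.dropWhile (· == b) (c :: l) = c :: l := by simp [hc]
    rw [htw2, hdw2]
    norm_num
  · rw [tcRuns]
    have htw : List.takeWhile (· == a) (b :: c :: l) = [] := by simp [hb]
    have hdw : List.dropWhile (· == a) (b :: c :: l) = b :: c :: l := by simp [hb]
    rw [htw, hdw]
    norm_num

-- the greedy scan computes the same total as the run decomposition
theorem tcGreedy_eq_tcRuns_aux (n : Nat) : ∀ (l : List Char), l.length ≤ n → tcGreedy l = tcRuns l := by
  induction n with
  | zero =>
    intro l hl
    have : l = [] := List.eq_nil_of_length_eq_zero (Nat.le_zero.mp hl)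
    subst this
    simp [tcGreedy, tcRuns]
  | succ n ih =>
    intro l hl
    match l with
    | [] => simp [tcGreedy, tcRuns]
    | [a] => simp [tcGreedy, tcRuns]
    | [a, b] =>
      by_cases hb : b = a
      · subst hb; simp [tcGreedy, tcRuns]
      · simp [tcGreedy, tcRuns, hb]
    | a :: b :: c :: rest =>
      simp only [List.length_cons] at hl
      by_cases habc : (a == b && b == c) = true
      · rw [tcGreedy, if_pos habc]
        simp only [Bool.and_eq_true, beq_iff_eq] at habc
        obtain ⟨hab, hbc⟩ := habc
        subst hab; subst hbc
        rw [ih rest (by omega), tcRuns_peel3]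
      · rw [tcGreedy, if_neg habc]
        rw [ih (b :: c :: rest) (by simp; omega)]
        simp only [Bool.and_eq_true, beq_iff_eq, not_and] at habc
        exact (tcRuns_skip1 a b c rest (fun ⟨h1, h2⟩ => habc h1 h2)).symm

theorem tcGreedy_eq_tcRuns (l : List Char) : tcGreedy l = tcRuns l :=
  tcGreedy_eq_tcRuns_aux l.length l le_rfl

-- ===== VERDICT (by name: the statement is the Claim_ definition above) =====
theorem threeConsec_spec : Claim_equal_threeConsec := by
  intro S _
  unfold Spec_threeConsec threeConsec threeConsec_alt
  rw [tcGreedy_eq_tcRuns]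
  cases hl : S.toList with
  | nil => simp [tcRuns]
  | cons x xs =>
    have hstep : tcStep (none, 0, 0) x = (some x, 1, 0) := by simp [tcStep]
    rw [List.foldl_cons, hstep, tcMain xs x 1 0 (by norm_num) (by norm_num)]
    simp [tcRuns]
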